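-- pv_equiv track=rewrite | github.com/afzalsiddique/problem-solving | Problem_Solving_Python/leetcode/lc1828.py | my_bisect_right
-- ===== SOURCE A (Python) =====
-- def my_bisect_right(arr, x):
--     lo=0
--     hi=len(arr)-1
--     while lo<=hi:
--         mid = lo+(hi-lo)//2
--         if x>=arr[mid][0]: # compare with x coordinate
--             lo=mid+1
--         else:
--             hi=mid-1
--     return lo
-- ===== SOURCE B (Python) =====
-- def my_bisect_right(arr, x):
--     # Recursive divide-and-conquer on slices (recursion depth O(log n)).
--     if not arr:
--         return 0
--     mid = (len(arr) - 1) // 2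
--     if x >= arr[mid][0]:
--         return mid + 1 + my_bisect_right(arr[mid+1:], x)
--     return my_bisect_right(arr[:mid], x)
-- ===== Notes on version B (the rewrite author's own statement) =====
-- stated objective: simpler
-- what changed: Replaced the iterative lo/hi-state binary-search loop with a divide-and-conquer recursion on list slices that returns 0 on the empty list and otherwise adds mid+1 before recursing on the right slice or recurses on the left slice; there is no loop state at all.
import Mathlib
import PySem

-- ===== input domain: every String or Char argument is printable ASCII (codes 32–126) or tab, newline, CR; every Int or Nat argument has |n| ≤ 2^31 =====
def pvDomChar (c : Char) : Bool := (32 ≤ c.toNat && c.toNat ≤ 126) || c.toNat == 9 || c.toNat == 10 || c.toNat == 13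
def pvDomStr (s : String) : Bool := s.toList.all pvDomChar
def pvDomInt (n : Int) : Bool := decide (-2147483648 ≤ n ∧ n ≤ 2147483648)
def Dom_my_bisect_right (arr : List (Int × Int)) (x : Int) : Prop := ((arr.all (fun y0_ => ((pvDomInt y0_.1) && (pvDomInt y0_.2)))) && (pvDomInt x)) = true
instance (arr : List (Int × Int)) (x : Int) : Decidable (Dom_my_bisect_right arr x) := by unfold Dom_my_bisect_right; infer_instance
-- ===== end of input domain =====

-- ===== PORT A =====
-- B rewrites the iterative lo/hi binary search as a divide-and-conquer recursion on
-- slices (objective: simpler); same return value on every input.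

-- A's while-loop, as a tail recursion over the loop state (lo, hi).
def myLoopA (arr : List (Int × Int)) (x lo hi : Int) : Int :=
  if _h : lo ≤ hi then
    let mid := lo + PySem.Int.floordiv (hi - lo) 2
    match PySem.List.pyGet? arr mid with
    | some p => if x ≥ p.1 then myLoopA arr x (mid + 1) hi else myLoopA arr x lo (mid - 1)
    | none => lo   -- IndexError; unreachable from my_bisect_right's initial bounds (totality guard only)
  else lo
termination_by (hi + 1 - lo).toNat
decreasing_by
  all_goals
    simp only [PySem.Int.floordiv_eq_ediv_of_pos (by norm_num : (0:Int) < 2)] at *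
    omega

def my_bisect_right (arr : List (Int × Int)) (x : Int) : Int :=
  myLoopA arr x 0 ((arr.length : Int) - 1)

-- ===== PORT B =====
def my_bisect_right_alt (arr : List (Int × Int)) (x : Int) : Int :=
  if _hne : arr = [] then 0
  else
    let mid := PySem.Int.floordiv ((arr.length : Int) - 1) 2
    match PySem.List.pyGet? arr mid with
    | some p =>
      if x ≥ p.1 then
        mid + 1 + my_bisect_right_alt (PySem.List.slice arr (some (mid + 1)) none) x
      else
        my_bisect_right_alt (PySem.List.slice arr none (some mid)) x
    | none => 0   -- arr[mid] never raises: arr is nonempty here (totality guard only)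
termination_by arr.length
decreasing_by
  all_goals
    have hlen : 0 < arr.length := List.length_pos_of_ne_nil _hne
    have hmid : 0 ≤ PySem.Int.floordiv ((arr.length : Int) - 1) 2 ∧
        PySem.Int.floordiv ((arr.length : Int) - 1) 2 < (arr.length : Int) := by
      simp only [PySem.Int.floordiv_eq_ediv_of_pos (by norm_num : (0:Int) < 2)]
      omega
  · rw [PySem.List.slice_from arr (by omega)]
    simp only [List.length_drop]
    omega
  · rw [PySem.List.slice_to arr hmid.1]
    simp only [List.length_take]
    omega

-- ===== PRECONDITION & SPEC =====
def Spec_my_bisect_right (arr : List (Int × Int)) (x : Int) (out : Int) : Prop := out = my_bisect_right_alt arr x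
instance (arr : List (Int × Int)) (x : Int) (out : Int) : Decidable (Spec_my_bisect_right arr x out) := by unfold Spec_my_bisect_right; infer_instance

-- ===== CLAIM (what is proved, stated in full; the proofs are below) =====
def Claim_equal_my_bisect_right : Prop := ∀ (arr : List (Int × Int)) (x : Int), Dom_my_bisect_right arr x → Spec_my_bisect_right arr x (my_bisect_right arr x)

-- ===== LEMMAS AND PROOFS =====

-- Loop/recursion correspondence: the loop on (lo, hi) computes lo plus B's answer on the segment arr[lo .. hi].
lemma myLoopA_eq_alt (arr : List (Int × Int)) (x : Int) (n : Nat) :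
    ∀ (lo hi : Int), (hi + 1 - lo).toNat ≤ n → 0 ≤ lo → hi < (arr.length : Int) →
    myLoopA arr x lo hi
      = lo + my_bisect_right_alt ((arr.drop lo.toNat).take (hi + 1 - lo).toNat) x := by
  induction n with
  | zero =>
    intro lo hi hn h0 hh
    have hgt : ¬ lo ≤ hi := by omega
    have hN : (hi + 1 - lo).toNat = 0 := by omega
    rw [myLoopA, dif_neg hgt, hN]
    simp [my_bisect_right_alt]
  | succ n ih =>
    intro lo hi hn h0 hh
    by_cases hle : lo ≤ hi
    · rw [myLoopA, dif_pos hle]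
      simp only [PySem.Int.floordiv_eq_ediv_of_pos (by norm_num : (0:Int) < 2)]
      set d : Int := (hi - lo) / 2 with hd
      have hd0 : 0 ≤ d := by omega
      have hdle : d ≤ hi - lo := by omega
      set N : Nat := (hi + 1 - lo).toNat with hN
      set seg : List (Int × Int) := (arr.drop lo.toNat).take N with hseg
      have hseglen : seg.length = N := by
        rw [hseg]; simp only [List.length_take, List.length_drop]; omega
      have hsegne : seg ≠ [] := by
        intro hnil; rw [hnil] at hseglen; simp at hseglen; omega
      -- both indexings hit the same element
      have hget : PySem.List.pyGet? arr (lo + d) = PySem.List.pyGet? seg d := by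
        rw [PySem.List.pyGet?_of_nonneg arr (by omega),
            PySem.List.pyGet?_of_nonneg seg hd0, hseg,
            List.getElem?_take, if_pos (by omega), List.getElem?_drop]
        congr 1; omega
      obtain ⟨p, hp⟩ : ∃ p, PySem.List.pyGet? arr (lo + d) = some p := by
        rw [PySem.List.pyGet?_eq_some_getElem arr (by omega) (by omega)]
        exact ⟨_, rfl⟩
      -- unfold B one step on the segment
      conv_rhs => rw [my_bisect_right_alt]
      rw [dif_neg hsegne]
      simp only [PySem.Int.floordiv_eq_ediv_of_pos (by norm_num : (0:Int) < 2)]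
      have hmidB : ((seg.length : Int) - 1) / 2 = d := by rw [hseglen]; omega
      rw [hmidB, ← hget, hp]
      dsimp only
      by_cases hx : x ≥ p.1
      · rw [if_pos hx, if_pos hx]
        rw [ih (lo + d + 1) hi (by omega) (by omega) hh]
        rw [PySem.List.slice_from seg (by omega : (0:Int) ≤ d + 1)]
        have hlist : seg.drop (d + 1).toNat
            = (arr.drop (lo + d + 1).toNat).take (hi + 1 - (lo + d + 1)).toNat := by
          have h1 : N - (d + 1).toNat = (hi + 1 - (lo + d + 1)).toNat := by omega
          have h2 : lo.toNat + (d + 1).toNat = (lo + d + 1).toNat := by omega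
          rw [hseg, List.drop_take, List.drop_drop, h1, h2]
        rw [hlist]; ring
      · rw [if_neg hx, if_neg hx]
        rw [ih lo (lo + d - 1) (by omega) h0 (by omega)]
        rw [PySem.List.slice_to seg hd0]
        have hlist : seg.take d.toNat
            = (arr.drop lo.toNat).take (lo + d - 1 + 1 - lo).toNat := by
          have h1 : min d.toNat N = (lo + d - 1 + 1 - lo).toNat := by omega
          rw [hseg, List.take_take, h1]
        rw [hlist]
    · have hN : (hi + 1 - lo).toNat = 0 := by omega
      rw [myLoopA, dif_neg hle, hN]
      simp [my_bisect_right_alt]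

-- ===== VERDICT (by name: the statement is the Claim_ definition above) =====
theorem my_bisect_right_spec : Claim_equal_my_bisect_right := by
  intro arr x _
  unfold Spec_my_bisect_right my_bisect_right
  have h := myLoopA_eq_alt arr x arr.length 0 ((arr.length : Int) - 1)
    (by omega) le_rfl (by omega)
  have hseg : ((arr.drop (0:Int).toNat).take (((arr.length : Int) - 1 + 1 - 0)).toNat) = arr := by
    simp
  rw [h, hseg]
  omega
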